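-- pv_equiv track=rewrite | github.com/MrBrantCode/unitest_baseline | mut_generate/mist_train_cf/cf_36532/solution.py | categorize_tags
-- ===== SOURCE A (Python) =====
-- def categorize_tags(tags):
--     tag_counts = {
--         "clothing": 0,
--         "jewelry": 0,
--         "shoes": 0,
--         "other": 0
--     }
--
--     clothing_tags = ["hat", "scarf", "gloves", "belt", "socks"]
--     jewelry_tags = ["bracelet", "earrings", "necklace"]
--
--     for tag in tags:
--         if tag in clothing_tags:
--             tag_counts["clothing"] += 1
--         elif tag in jewelry_tags:
--             tag_counts["jewelry"] += 1
--         elif tag == "shoes":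
--             tag_counts["shoes"] += 1
--         else:
--             tag_counts["other"] += 1
--
--     return tag_counts
-- ===== SOURCE B (Python) =====
-- def categorize_tags(tags):
--     clothing_tags = ["hat", "scarf", "gloves", "belt", "socks"]
--     jewelry_tags = ["bracelet", "earrings", "necklace"]
--     clothing = sum(tags.count(t) for t in clothing_tags)
--     jewelry = sum(tags.count(t) for t in jewelry_tags)
--     shoes = tags.count("shoes")
--     return {
--         "clothing": clothing,
--         "jewelry": jewelry,
--         "shoes": shoes,
--         "other": len(tags) - clothing - jewelry - shoes,
--     }
-- ===== Notes on version B (the rewrite author's own statement) =====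
-- stated objective: alternative
-- what changed: Instead of a single pass dispatching each tag through an if/elif cascade into a mutable counts dict, B computes each category total by whole-list tags.count() passes per known tag and derives 'other' by subtraction from len(tags), never classifying individual tags.
import Mathlib
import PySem

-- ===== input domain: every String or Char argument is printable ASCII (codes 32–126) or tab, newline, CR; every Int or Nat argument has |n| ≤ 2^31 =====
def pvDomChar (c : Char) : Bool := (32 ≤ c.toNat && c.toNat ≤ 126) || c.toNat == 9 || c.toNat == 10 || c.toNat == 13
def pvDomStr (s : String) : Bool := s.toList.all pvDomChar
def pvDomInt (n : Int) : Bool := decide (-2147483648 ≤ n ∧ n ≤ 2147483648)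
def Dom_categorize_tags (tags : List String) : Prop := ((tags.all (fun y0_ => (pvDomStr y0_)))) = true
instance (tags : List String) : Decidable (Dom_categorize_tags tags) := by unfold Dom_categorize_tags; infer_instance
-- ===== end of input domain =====

-- B replaces A's per-tag if/elif dispatch loop with per-category whole-list count passes
-- (and 'other' by subtraction from len(tags)); alternative decomposition, same cost.

-- ===== PORT A =====
def categorize_tags (tags : List String) : List (String × Int) :=
  let tag_counts : PySem.Dict String Int :=
    PySem.Dict.ofList [("clothing", 0), ("jewelry", 0), ("shoes", 0), ("other", 0)]
  let clothing_tags : List String := ["hat", "scarf", "gloves", "belt", "socks"]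
  let jewelry_tags : List String := ["bracelet", "earrings", "necklace"]
  (tags.foldl (fun d tag =>
      if clothing_tags.contains tag then d.modify "clothing" 0 (· + 1)
      else if jewelry_tags.contains tag then d.modify "jewelry" 0 (· + 1)
      else if tag == "shoes" then d.modify "shoes" 0 (· + 1)
      else d.modify "other" 0 (· + 1)) tag_counts).items

-- ===== PORT B =====
def categorize_tags_alt (tags : List String) : List (String × Int) :=
  let clothing_tags : List String := ["hat", "scarf", "gloves", "belt", "socks"]
  let jewelry_tags : List String := ["bracelet", "earrings", "necklace"]
  let clothing : Int := (clothing_tags.map (fun t => (tags.count t : Int))).sum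
  let jewelry : Int := (jewelry_tags.map (fun t => (tags.count t : Int))).sum
  let shoes : Int := (tags.count "shoes" : Int)
  [("clothing", clothing), ("jewelry", jewelry), ("shoes", shoes),
   ("other", (tags.length : Int) - clothing - jewelry - shoes)]

-- ===== PRECONDITION & SPEC =====
def Spec_categorize_tags (tags : List String) (out : List (String × Int)) : Prop := out = categorize_tags_alt tags
instance (tags : List String) (out : List (String × Int)) : Decidable (Spec_categorize_tags tags out) := by unfold Spec_categorize_tags; infer_instance

-- ===== CLAIM =====
def Claim_equal_categorize_tags : Prop := ∀ (tags : List String), Dom_categorize_tags tags → Spec_categorize_tags tags (categorize_tags tags)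

-- ===== LEMMAS AND PROOFS =====

-- B's clothing/jewelry totals, as proof-side abbreviations
def pvC (tags : List String) : Int :=
  ((["hat", "scarf", "gloves", "belt", "socks"] : List String).map (fun t => (tags.count t : Int))).sum
def pvJ (tags : List String) : Int :=
  ((["bracelet", "earrings", "necklace"] : List String).map (fun t => (tags.count t : Int))).sum

-- A's loop, with the four running counts generalized, produces B's four totals
theorem pv_loop (tags : List String) : ∀ (a b c d : Int),
    (tags.foldl (fun d tag =>
        if (["hat", "scarf", "gloves", "belt", "socks"] : List String).contains tag then d.modify "clothing" 0 (· + 1)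
        else if (["bracelet", "earrings", "necklace"] : List String).contains tag then d.modify "jewelry" 0 (· + 1)
        else if tag == "shoes" then d.modify "shoes" 0 (· + 1)
        else d.modify "other" 0 (· + 1))
      (PySem.Dict.mk [("clothing", a), ("jewelry", b), ("shoes", c), ("other", d)])).items
    = [("clothing", a + pvC tags), ("jewelry", b + pvJ tags),
       ("shoes", c + (tags.count "shoes" : Int)),
       ("other", d + ((tags.length : Int) - pvC tags - pvJ tags - (tags.count "shoes" : Int)))] := by
  induction tags with
  | nil => intro a b c d; simp [pvC, pvJ]
  | cons tag rest ih =>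
    intro a b c d
    by_cases h1 : tag = "hat"
    · subst h1
      show (rest.foldl _ (PySem.Dict.mk [("clothing", a + 1), ("jewelry", b), ("shoes", c), ("other", d)])).items = _
      rw [ih]
      simp [pvC, pvJ, List.count_cons]
      and_intros <;> ring
    by_cases h2 : tag = "scarf"
    · subst h2
      show (rest.foldl _ (PySem.Dict.mk [("clothing", a + 1), ("jewelry", b), ("shoes", c), ("other", d)])).items = _
      rw [ih]
      simp [pvC, pvJ, List.count_cons]
      and_intros <;> ring
    by_cases h3 : tag = "gloves"
    · subst h3
      show (rest.foldl _ (PySem.Dict.mk [("clothing", a + 1), ("jewelry", b), ("shoes", c), ("other", d)])).items = _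
      rw [ih]
      simp [pvC, pvJ, List.count_cons]
      and_intros <;> ring
    by_cases h4 : tag = "belt"
    · subst h4
      show (rest.foldl _ (PySem.Dict.mk [("clothing", a + 1), ("jewelry", b), ("shoes", c), ("other", d)])).items = _
      rw [ih]
      simp [pvC, pvJ, List.count_cons]
      and_intros <;> ring
    by_cases h5 : tag = "socks"
    · subst h5
      show (rest.foldl _ (PySem.Dict.mk [("clothing", a + 1), ("jewelry", b), ("shoes", c), ("other", d)])).items = _
      rw [ih]
      simp [pvC, pvJ, List.count_cons]
      and_intros <;> ring
    by_cases h6 : tag = "bracelet"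
    · subst h6
      show (rest.foldl _ (PySem.Dict.mk [("clothing", a), ("jewelry", b + 1), ("shoes", c), ("other", d)])).items = _
      rw [ih]
      simp [pvC, pvJ, List.count_cons]
      and_intros <;> ring
    by_cases h7 : tag = "earrings"
    · subst h7
      show (rest.foldl _ (PySem.Dict.mk [("clothing", a), ("jewelry", b + 1), ("shoes", c), ("other", d)])).items = _
      rw [ih]
      simp [pvC, pvJ, List.count_cons]
      and_intros <;> ring
    by_cases h8 : tag = "necklace"
    · subst h8
      show (rest.foldl _ (PySem.Dict.mk [("clothing", a), ("jewelry", b + 1), ("shoes", c), ("other", d)])).items = _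
      rw [ih]
      simp [pvC, pvJ, List.count_cons]
      and_intros <;> ring
    by_cases h9 : tag = "shoes"
    · subst h9
      show (rest.foldl _ (PySem.Dict.mk [("clothing", a), ("jewelry", b), ("shoes", c + 1), ("other", d)])).items = _
      rw [ih]
      simp [pvC, pvJ, List.count_cons]
      and_intros <;> ring
    · have e1 : (["hat", "scarf", "gloves", "belt", "socks"] : List String).contains tag = false := by
        simp [h1, h2, h3, h4, h5]
      have e2 : (["bracelet", "earrings", "necklace"] : List String).contains tag = false := by
        simp [h6, h7, h8]
      have e3 : (tag == "shoes") = false := beq_eq_false_iff_ne.mpr h9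
      simp only [List.foldl_cons, e1, e2, e3, Bool.false_eq_true, if_false]
      show (rest.foldl _ (PySem.Dict.mk [("clothing", a), ("jewelry", b), ("shoes", c), ("other", d + 1)])).items = _
      rw [ih]
      simp [pvC, pvJ, List.count_cons, h1, h2, h3, h4, h5, h6, h7, h8, h9]
      ring

-- ===== VERDICT =====
theorem categorize_tags_spec : Claim_equal_categorize_tags := by
  intro tags _
  unfold Spec_categorize_tags categorize_tags categorize_tags_alt
  have h := pv_loop tags 0 0 0 0
  simp only [zero_add] at h
  exact h
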